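-- pv_equiv track=rewrite | github.com/bstac/Experiments | Primes.py | notZ
-- ===== SOURCE A (Python) =====
-- def notZ(l):
--     c = 0
--     cnt = 1 #+1, to len, not index
--     ret = [] #this takes the whole primeFact
--     for x in l[0]:
--         if(x!=0):
--             c = cnt #c is last non zero
--         cnt+=1
--     return([l[0][:c],l[1][:c]])
-- ===== SOURCE B (Python) =====
-- def notZ(l):
--     c = len(l[0])
--     while c > 0 and l[0][c - 1] == 0:
--         c -= 1
--     return [l[0][:c], l[1][:c]]
-- ===== Notes on version B (the rewrite author's own statement) =====
-- stated objective: simpler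
-- what changed: Replaces the forward full scan that tracks the last-nonzero position in a counter with a backward early-terminating scan that shrinks the cut index past the trailing zeros.
import Mathlib
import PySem

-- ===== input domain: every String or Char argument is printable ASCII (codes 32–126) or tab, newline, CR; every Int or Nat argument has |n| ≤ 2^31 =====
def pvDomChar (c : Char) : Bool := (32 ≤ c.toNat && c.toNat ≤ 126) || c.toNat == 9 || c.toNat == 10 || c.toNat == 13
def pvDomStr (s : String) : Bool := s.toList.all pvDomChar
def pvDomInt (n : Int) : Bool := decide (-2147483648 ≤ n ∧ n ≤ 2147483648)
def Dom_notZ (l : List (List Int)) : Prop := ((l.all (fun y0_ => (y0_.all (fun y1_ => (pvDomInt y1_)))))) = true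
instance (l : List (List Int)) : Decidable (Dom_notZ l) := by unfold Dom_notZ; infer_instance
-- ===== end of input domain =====

-- B trims the trailing zeros by a backward early-terminating scan instead of A's
-- forward scan tracking the last nonzero position (objective: simpler).

-- ===== PORT A =====
-- for x in l[0]: if x != 0: c = cnt; cnt += 1   — fold carrying (c, cnt), started at (0, 1)
def notZ (l : List (List Int)) : List (List Int) :=
  match l with
  | l0 :: l1 :: _ =>
    let s := l0.foldl (fun (p : Nat × Nat) x => (if x ≠ 0 then p.2 else p.1, p.2 + 1)) (0, 1)
    [l0.take s.1, l1.take s.1]  -- l[0][:c], l[1][:c] with 0 ≤ c ≤ len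
  | _ => []  -- unreachable under Pre_notZ (Python raises IndexError)

-- ===== PORT B =====
-- while c > 0 and l[0][c-1] == 0: c -= 1   — structural recursion on c
def cutB (l0 : List Int) : Nat → Nat
  | 0 => 0
  | c + 1 => if l0.getD c 0 = 0 then cutB l0 c else c + 1

def notZ_alt (l : List (List Int)) : List (List Int) :=
  let l0 := l.getD 0 []  -- l[0]; default unreachable under Pre_notZ (Python raises IndexError)
  let l1 := l.getD 1 []  -- l[1]; likewise
  let c := cutB l0 l0.length
  [l0.take c, l1.take c]

-- ===== PRECONDITION & SPEC =====
-- A indexes l[0] and l[1]: it raises IndexError when l has fewer than two elements.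
def Pre_notZ (l : List (List Int)) : Prop := 2 ≤ l.length
instance (l : List (List Int)) : Decidable (Pre_notZ l) := by unfold Pre_notZ; infer_instance
def pvWitness_notZ : List (List Int) := [[2, 3, 0, 0], [1, 1, 2, 0]]

def Spec_notZ (l : List (List Int)) (out : List (List Int)) : Prop := out = notZ_alt l
instance (l : List (List Int)) (out : List (List Int)) : Decidable (Spec_notZ l out) := by unfold Spec_notZ; infer_instance

-- ===== CLAIM (what is proved, stated in full; the proofs are below) =====
def Claim_equal_notZ : Prop := ∀ (l : List (List Int)), Dom_notZ l → Pre_notZ l → Spec_notZ l (notZ l)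

-- ===== LEMMAS AND PROOFS =====

-- A's loop body
def stepA (p : Nat × Nat) (x : Int) : Nat × Nat := (if x ≠ 0 then p.2 else p.1, p.2 + 1)

theorem stepA_eq : (fun (p : Nat × Nat) x => (if x ≠ 0 then p.2 else p.1, p.2 + 1)) = stepA := rfl

theorem foldA_snd (a : List Int) (s : Nat × Nat) :
    (a.foldl stepA s).2 = s.2 + a.length := by
  induction a generalizing s with
  | nil => simp [List.foldl]
  | cons x t ih => simp [List.foldl, stepA, ih]; omega

theorem cutB_extend (x : Int) (a : List Int) :
    ∀ n, n ≤ a.length → cutB (a ++ [x]) n = cutB a n := by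
  intro n
  induction n with
  | zero => intro _; rfl
  | succ c ih =>
    intro h
    have hc : c < a.length := by omega
    simp [cutB, List.getD_eq_getElem?_getD, List.getElem?_append_left hc, ih (by omega)]

theorem foldA_eq_cutB (a : List Int) :
    (a.foldl stepA (0, 1)).1 = cutB a a.length := by
  induction a using List.reverseRecOn with
  | nil => rfl
  | append_singleton a x ih =>
    rw [List.foldl_append]
    have hx : (a ++ [x]).getD a.length 0 = x := by
      simp [List.getD_eq_getElem?_getD]
    simp only [List.length_append, List.length_cons, List.length_nil]
    rw [show a.length + 1 = a.length + 1 from rfl]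
    simp only [cutB, hx]
    rw [cutB_extend x a a.length le_rfl]
    by_cases h : x = 0
    · simp [List.foldl, stepA, h, ih]
    · simp [List.foldl, stepA, h, foldA_snd]; omega

-- ===== VERDICT (by name: the statement is the Claim_ definition above) =====
theorem notZ_spec : Claim_equal_notZ := by
  intro l _ hpre
  unfold Spec_notZ notZ notZ_alt
  match l with
  | [] => simp [Pre_notZ] at hpre
  | [_] => simp [Pre_notZ] at hpre
  | l0 :: l1 :: t =>
    simp only [List.getD_cons_zero, List.getD_cons_succ]
    rw [stepA_eq, foldA_eq_cutB]
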